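-- pv_equiv track=rewrite | github.com/esraderey/TAEC | taec/advanced_module.py | _remove_dead_code
-- ===== SOURCE A (Python) =====
-- def _remove_dead_code(code: str) -> str:
--     """Elimina código inalcanzable"""
--     # Análisis simple de flujo
--     lines = code.split('\n')
--     cleaned_lines = []
--     skip_until_outdent = False
--     current_indent = 0
--
--     for line in lines:
--         stripped = line.lstrip()
--
--         if skip_until_outdent:
--             line_indent = len(line) - len(stripped)
--             if line_indent <= current_indent:
--                 skip_until_outdent = False
--             else:
--                 continue
--
--         if stripped.startswith('return'):
--             cleaned_lines.append(line)
--             skip_until_outdent = True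
--             current_indent = len(line) - len(stripped)
--         else:
--             cleaned_lines.append(line)
--
--     return '\n'.join(cleaned_lines)
-- ===== SOURCE B (Python) =====
-- def _remove_dead_code(code: str) -> str:
--     """Elimina código inalcanzable"""
--     lines = code.split('\n')
--     out = []
--     i = 0
--     n = len(lines)
--     while i < n:
--         line = lines[i]
--         out.append(line)
--         stripped = line.lstrip()
--         i += 1
--         if stripped.startswith('return'):
--             indent = len(line) - len(stripped)
--             while i < n and len(lines[i]) - len(lines[i].lstrip()) > indent:
--                 i += 1
--     return '\n'.join(out)
-- ===== Notes on version B (the rewrite author's own statement) =====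
-- stated objective: alternative
-- what changed: Replaced A's persistent skip-flag/current-indent state machine carried through every iteration by an index-driven outer loop that, right after appending a return-starting line, runs an inner loop consuming all more-indented following lines, so no skip state survives across iterations.
import Mathlib
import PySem

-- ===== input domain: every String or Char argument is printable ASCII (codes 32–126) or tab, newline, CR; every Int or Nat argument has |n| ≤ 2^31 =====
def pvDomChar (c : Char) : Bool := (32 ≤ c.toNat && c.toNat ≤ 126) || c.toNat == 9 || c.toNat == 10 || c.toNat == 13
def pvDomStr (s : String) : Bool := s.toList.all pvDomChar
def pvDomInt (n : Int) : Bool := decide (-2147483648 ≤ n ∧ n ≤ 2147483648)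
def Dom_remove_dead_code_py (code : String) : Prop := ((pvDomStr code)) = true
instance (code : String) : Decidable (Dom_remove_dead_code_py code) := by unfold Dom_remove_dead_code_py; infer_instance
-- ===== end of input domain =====

-- B replaces A's persistent skip-flag state machine by an index-driven loop with an inner
-- skip loop after each 'return' line (objective: alternative decomposition, same cost).

-- ===== PORT A =====
-- A's for loop over lines, carrying (cleaned_lines, skip_until_outdent, current_indent).
def pvALoop (ls : List (List Char)) (acc : List (List Char)) (skip : Bool) (cur : Int) :
    List (List Char) :=
  match ls with
  | [] => acc
  | line :: rest =>
    let stripped := PySem.Chars.lstrip line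
    -- 'if skip_until_outdent: … else: continue' — the continue branch:
    if skip && !(decide (PySem.Chars.len line - PySem.Chars.len stripped ≤ cur)) then
      pvALoop rest acc skip cur
    else
      -- skip (if it was set) is now false; process the line normally
      if PySem.Chars.startswith stripped ['r','e','t','u','r','n'] then
        pvALoop rest (acc ++ [line]) true (PySem.Chars.len line - PySem.Chars.len stripped)
      else
        pvALoop rest (acc ++ [line]) false cur

def remove_dead_code_py (code : String) : String :=
  String.ofList (PySem.Chars.join ['\n']
    (pvALoop (PySem.Chars.splitOn code.toList ['\n']) [] false 0))

-- ===== PORT B =====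
def pvIndent (line : List Char) : Int :=
  PySem.Chars.len line - PySem.Chars.len (PySem.Chars.lstrip line)

-- B's inner while loop: advance past lines more indented than cur
def pvBSkip (cur : Int) : List (List Char) → List (List Char)
  | [] => []
  | l :: rest => if cur < pvIndent l then pvBSkip cur rest else l :: rest

theorem pvBSkip_length_le (cur : Int) (ls : List (List Char)) :
    (pvBSkip cur ls).length ≤ ls.length := by
  induction ls with
  | nil => simp [pvBSkip]
  | cons l rest ih =>
    simp only [pvBSkip]
    split
    · exact Nat.le_succ_of_le ih
    · exact Nat.le_refl _

-- B's outer while loop over the line index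
def pvBOuter : List (List Char) → List (List Char)
  | [] => []
  | l :: rest =>
    if PySem.Chars.startswith (PySem.Chars.lstrip l) ['r','e','t','u','r','n'] then
      l :: pvBOuter (pvBSkip (pvIndent l) rest)
    else
      l :: pvBOuter rest
termination_by ls => ls.length
decreasing_by
  · exact Nat.lt_succ_of_le (pvBSkip_length_le _ _)
  · exact Nat.lt_succ_self _

def remove_dead_code_py_alt (code : String) : String :=
  String.ofList (PySem.Chars.join ['\n']
    (pvBOuter (PySem.Chars.splitOn code.toList ['\n'])))

-- ===== PRECONDITION & SPEC =====
def Spec_remove_dead_code_py (code : String) (out : String) : Prop := out = remove_dead_code_py_alt code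
instance (code : String) (out : String) : Decidable (Spec_remove_dead_code_py code out) := by unfold Spec_remove_dead_code_py; infer_instance

-- ===== CLAIM (what is proved, stated in full; the proofs are below) =====
def Claim_equal_remove_dead_code_py : Prop := ∀ (code : String), Dom_remove_dead_code_py code → Spec_remove_dead_code_py code (remove_dead_code_py code)

-- ===== LEMMAS AND PROOFS =====

-- A in skip mode behaves like B's inner skip loop followed by A in normal mode.
theorem pvALoop_skip (ls : List (List Char)) :
    ∀ (acc : List (List Char)) (cur : Int),
      pvALoop ls acc true cur = pvALoop (pvBSkip cur ls) acc false cur := by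
  induction ls with
  | nil => intro acc cur; rfl
  | cons l rest ih =>
    intro acc cur
    by_cases h : PySem.Chars.len l - PySem.Chars.len (PySem.Chars.lstrip l) ≤ cur
    · have hb : ¬ cur < pvIndent l := not_lt.mpr h
      rw [pvBSkip, if_neg hb]
      simp only [pvALoop, decide_eq_true h, Bool.not_true, Bool.and_false, Bool.false_eq_true,
        if_false]
    · have hb : cur < pvIndent l := not_le.mp h
      rw [pvBSkip, if_pos hb]
      simp only [pvALoop, decide_eq_false h, Bool.not_false, Bool.and_true]
      exact ih acc cur

-- A in normal mode appends exactly B's outer-loop output.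
theorem pvALoop_eq_pvBOuter (n : Nat) :
    ∀ (ls : List (List Char)), ls.length ≤ n →
    ∀ (acc : List (List Char)) (cur : Int),
      pvALoop ls acc false cur = acc ++ pvBOuter ls := by
  induction n with
  | zero =>
    intro ls hls acc cur
    have : ls = [] := List.eq_nil_of_length_eq_zero (Nat.le_zero.mp hls)
    subst this; simp [pvALoop, pvBOuter]
  | succ n ih =>
    intro ls hls acc cur
    match ls with
    | [] => simp [pvALoop, pvBOuter]
    | l :: rest =>
      have hrest : rest.length ≤ n := Nat.lt_succ_iff.mp (by simpa using hls)
      by_cases hret : PySem.Chars.startswith (PySem.Chars.lstrip l) ['r','e','t','u','r','n'] = true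
      · simp only [pvALoop, Bool.false_and, Bool.false_eq_true, if_false, hret, if_pos]
        rw [pvALoop_skip, ih _ (Nat.le_trans (pvBSkip_length_le _ _) hrest)]
        simp [pvBOuter, hret, pvIndent]
      · simp only [pvALoop, Bool.false_and, Bool.false_eq_true, if_false, hret]
        rw [ih _ hrest]
        simp [pvBOuter, hret]

-- ===== VERDICT (by name: the statement is the Claim_ definition above) =====
theorem remove_dead_code_py_spec : Claim_equal_remove_dead_code_py := by
  intro code _
  unfold Spec_remove_dead_code_py remove_dead_code_py remove_dead_code_py_alt
  rw [pvALoop_eq_pvBOuter (PySem.Chars.splitOn code.toList ['\n']).length _ (Nat.le_refl _)]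
  simp
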